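-- pv_equiv track=rewrite | github.com/Agentic-Environmental-Engineering/GymVerse | gem/gem/envs/RLVE/face_right_way_env.py | _compute_optimal_plan
-- ===== SOURCE A (Python) =====
-- from typing import Any, Optional, SupportsFloat, Tuple, List
--
-- def _compute_optimal_plan(A0: List[int]) -> Tuple[int, int, str]:
--     """Compute the optimal (K, M) and a corresponding operations plan that zeroes the array.
--
--     Returns:
--         (ansK, ansM, operations_string)
--     """
--     N = len(A0)
--     # Default solution with K=1: flip each 1 individually
--     ansK = 1
--     ansM = sum(A0)
--     reference_ops = "\n".join(f"{i} {i}" for i, val in enumerate(A0, start=1) if val)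
--
--     # Convert A to 1-indexed for the greedy evaluation over K
--     A = [None] + A0[:]  # 1-indexed
--
--     for K in range(1, N + 1):
--         flip = [0] * (N + 1)  # flip[i] == 1 if we start a K-flip at position i
--         curr = 0  # parity of active flips affecting current position
--         m = 0
--         possible = True
--         current_answer_lines: List[str] = []
--
--         for i in range(1, N + 1):
--             # Remove the effect of a flip that ends before i
--             if i - K >= 1:
--                 curr ^= flip[i - K]
--
--             # If after applying current parity we still see a 1 at i, we need to flip starting at i
--             need_flip = A[i] ^ (curr == 1)
--             if need_flip:
--                 # Cannot start a K-flip if it would exceed bounds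
--                 if i + K - 1 > N:
--                     possible = False
--                     break
--                 current_answer_lines.append(f"{i} {i + K - 1}")
--                 flip[i] = 1
--                 curr ^= 1
--                 m += 1
--
--         if possible and m < ansM:
--             ansM = m
--             ansK = K
--             reference_ops = "\n".join(current_answer_lines)
--
--     return ansK, ansM, reference_ops
-- ===== SOURCE B (Python) =====
-- from typing import List, Optional, Tuple
--
-- def _simulate(A0: List[int], K: int, N: int) -> Optional[List[str]]:
--     """Physically apply the greedy K-flips to a working suffix; return op lines or None if impossible."""
--     suffix = list(A0)
--     ops: List[str] = []
--     i = 0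
--     while suffix:
--         x = suffix.pop(0)
--         if x:
--             if i + K > N:
--                 return None
--             suffix = [v ^ 1 for v in suffix[:K - 1]] + suffix[K - 1:]
--             ops.append(f"{i + 1} {i + K}")
--         i += 1
--     return ops
--
-- def _compute_optimal_plan(A0: List[int]) -> Tuple[int, int, str]:
--     N = len(A0)
--     best = (1, sum(A0), "\n".join(f"{i} {i}" for i, val in enumerate(A0, start=1) if val))
--     for K in range(1, N + 1):
--         plan = _simulate(A0, K, N)
--         if plan is not None and len(plan) < best[1]:
--             best = (K, len(plan), "\n".join(plan))
--     return best
-- ===== Notes on version B (the rewrite author's own statement) =====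
-- stated objective: simpler
-- what changed: B drops A's difference-array/parity bookkeeping (flip markers plus a running XOR of expiring flips) and instead physically simulates each candidate K on a working copy, popping the head cell and XOR-flipping the next K-1 cells whenever the current cell is nonzero, collecting the plan and taking its length as the flip count.
import Mathlib
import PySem

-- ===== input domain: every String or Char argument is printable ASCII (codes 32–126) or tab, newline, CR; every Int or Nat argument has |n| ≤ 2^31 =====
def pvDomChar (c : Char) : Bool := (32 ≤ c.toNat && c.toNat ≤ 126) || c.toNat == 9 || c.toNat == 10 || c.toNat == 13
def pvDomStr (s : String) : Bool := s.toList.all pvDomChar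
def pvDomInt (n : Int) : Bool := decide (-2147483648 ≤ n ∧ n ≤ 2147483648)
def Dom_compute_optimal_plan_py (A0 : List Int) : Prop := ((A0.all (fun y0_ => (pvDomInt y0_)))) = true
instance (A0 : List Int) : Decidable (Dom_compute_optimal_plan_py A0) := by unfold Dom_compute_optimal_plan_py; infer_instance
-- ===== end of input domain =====

-- B replaces A's flip-marker array + running parity bookkeeping by a direct physical
-- simulation that XOR-flips the K-cell window on a working copy (objective: simpler, not faster).

-- ===== PORT A =====

-- f"{a} {b}"
def pvLine (a b : Int) : String := PySem.Int.toStr a ++ " " ++ PySem.Int.toStr b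

-- the inner `for i in range(1, N+1)` loop of A with its break, as fuel recursion
-- (fuel = number of remaining iterations); returns (possible, m, lines)
def aLoop (A : List Int) (N K : Int) (i : Int) (flip : List Int) (curr m : Int)
    (lines : List String) : Nat → Bool × Int × List String
  | 0 => (true, m, lines)
  | fuel + 1 =>
    let curr1 := if 1 ≤ i - K then PySem.Int.bxor curr (PySem.List.pyGetD flip (i - K) 0) else curr
    let need := PySem.Int.bxor (PySem.List.pyGetD A i 0) (if curr1 = 1 then 1 else 0)
    if need ≠ 0 then
      if i + K - 1 > N then (false, m, lines)
      else aLoop A N K (i + 1) (flip.set i.toNat 1) (PySem.Int.bxor curr1 1) (m + 1)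
            (lines ++ [pvLine i (i + K - 1)]) fuel
    else aLoop A N K (i + 1) flip curr1 m lines fuel

def compute_optimal_plan_py (A0 : List Int) : Int × Int × String :=
  let N : Int := A0.length
  let refOps : String := PySem.Str.join "\n"
    (((PySem.List.enumerate A0 1).filter (fun p => p.2 != 0)).map (fun p => pvLine p.1 p.1))
  let A : List Int := 0 :: A0   -- `[None] + A0`; index 0 is never read
  (PySem.List.pyRange 1 (N + 1) 1).foldl (fun st K =>
      let r := aLoop A N K 1 (List.replicate (N.toNat + 1) 0) 0 0 [] N.toNat
      if r.1 = true ∧ r.2.1 < st.2.1 then (K, r.2.1, PySem.Str.join "\n" r.2.2) else st)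
    (1, A0.sum, refOps)

-- ===== PORT B =====

-- xs[:b] and xs[b:] partition xs (used only for bSim's termination)
theorem slice_split_length (l : List Int) (b : Int) :
    (PySem.List.slice l none (some b)).length + (PySem.List.slice l (some b) none).length
      = l.length := by
  simp [PySem.List.slice, PySem.List.clampIdx]
  split_ifs <;> omega

-- the `while suffix` loop of `_simulate`: pop the head, physically flip the next K-1 cells
def bSim (K N : Int) (i : Int) (suffix : List Int) (ops : List String) : Option (List String) :=
  match suffix with
  | [] => some ops
  | x :: rest =>
    if x ≠ 0 then
      if i + K > N then none
      else bSim K N (i + 1)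
        (((PySem.List.slice rest none (some (K - 1))).map (fun v => PySem.Int.bxor v 1)) ++
          PySem.List.slice rest (some (K - 1)) none)
        (ops ++ [pvLine (i + 1) (i + K)])
    else bSim K N (i + 1) rest ops
termination_by suffix.length
decreasing_by
  · simp only [List.length_append, List.length_map, List.length_cons]
    have := slice_split_length rest (K - 1)
    omega
  · simp only [List.length_cons]; omega

def compute_optimal_plan_py_alt (A0 : List Int) : Int × Int × String :=
  let N : Int := A0.length
  (PySem.List.pyRange 1 (N + 1) 1).foldl (fun best K =>
      match bSim K N 0 A0 [] with
      | none => best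
      | some plan =>
        if (plan.length : Int) < best.2.1 then (K, (plan.length : Int), PySem.Str.join "\n" plan)
        else best)
    (1, A0.sum,
      PySem.Str.join "\n"
        (((PySem.List.enumerate A0 1).filter (fun p => p.2 != 0)).map (fun p => pvLine p.1 p.1)))

-- ===== PRECONDITION & SPEC =====
def Spec_compute_optimal_plan_py (A0 : List Int) (out : Int × Int × String) : Prop := out = compute_optimal_plan_py_alt A0
instance (A0 : List Int) (out : Int × Int × String) : Decidable (Spec_compute_optimal_plan_py A0 out) := by unfold Spec_compute_optimal_plan_py; infer_instance

-- ===== CLAIM (what is proved, stated in full; the proofs are below) =====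
def Claim_equal_compute_optimal_plan_py : Prop := ∀ (A0 : List Int), Dom_compute_optimal_plan_py A0 → Spec_compute_optimal_plan_py A0 (compute_optimal_plan_py A0)

-- ===== LEMMAS AND PROOFS =====

-- `Bit x`: x is a 0/1 value (flip markers, parities)
def Bit (x : Int) : Prop := x = 0 ∨ x = 1

-- XOR of the flip markers flip[s] for 1 ≤ s ≤ hi with lo ≤ s
def win (flip : List Int) (lo : Int) : Nat → Int
  | 0 => 0
  | hi + 1 =>
    if lo ≤ (hi + 1 : Int) then PySem.Int.bxor (win flip lo hi) (flip.getD (hi + 1) 0)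
    else win flip lo hi

theorem win_zero (flip : List Int) (lo : Int) : win flip lo 0 = 0 := rfl

theorem win_succ_of_le (flip : List Int) (lo : Int) (hi : Nat) (h : lo ≤ (hi + 1 : Int)) :
    win flip lo (hi + 1) = PySem.Int.bxor (win flip lo hi) (flip.getD (hi + 1) 0) := by
  simp [win, h]

theorem win_succ_of_gt (flip : List Int) (lo : Int) (hi : Nat) (h : ¬ lo ≤ (hi + 1 : Int)) :
    win flip lo (hi + 1) = win flip lo hi := by
  simp [win, h]

theorem bxor_bit (a b : Int) (ha : Bit a) (hb : Bit b) : Bit (PySem.Int.bxor a b) := by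
  rcases ha with ha | ha <;> rcases hb with hb | hb <;> subst ha <;> subst hb <;>
    first
      | exact Or.inl (by decide)
      | exact Or.inr (by decide)

theorem win_bit (flip : List Int) (lo : Int) (hi : Nat)
    (hbit : ∀ s : Nat, Bit (flip.getD s 0)) : Bit (win flip lo hi) := by
  induction hi with
  | zero => exact Or.inl rfl
  | succ hi ih =>
    by_cases h : lo ≤ (hi + 1 : Int)
    · rw [win_succ_of_le _ _ _ h]; exact bxor_bit _ _ ih (hbit _)
    · rw [win_succ_of_gt _ _ _ h]; exact ih

theorem getD_set_ne (l : List Int) (p q : Nat) (v d : Int) (h : p ≠ q) :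
    (l.set p v).getD q d = l.getD q d := by
  simp [List.getD_eq_getElem?_getD, List.getElem?_set_ne h]

theorem getD_set_self (l : List Int) (p : Nat) (v d : Int) (h : p < l.length) :
    (l.set p v).getD p d = v := by
  simp [List.getD_eq_getElem?_getD, List.getElem?_set_self h]

theorem replicate_getD (n s : Nat) : (List.replicate n (0:Int)).getD s 0 = 0 := by
  simp [List.getD_eq_getElem?_getD, List.getElem?_replicate]
  split <;> rfl

theorem pyGetD_toNat (xs : List Int) (i : Int) (d : Int) (h : 0 ≤ i) :
    PySem.List.pyGetD xs i d = xs.getD i.toNat d := by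
  have hx := PySem.List.pyGetD_natCast xs i.toNat d
  rw [Int.toNat_of_nonneg h] at hx
  exact hx

theorem win_set_of_gt (flip : List Int) (lo : Int) (hi : Nat) (p : Nat) (v : Int)
    (h : hi < p) : win (flip.set p v) lo hi = win flip lo hi := by
  induction hi with
  | zero => rfl
  | succ hi ih =>
    have ih' := ih (by omega)
    by_cases hc : lo ≤ (hi + 1 : Int)
    · rw [win_succ_of_le _ _ _ hc, win_succ_of_le _ _ _ hc, ih',
        getD_set_ne _ _ _ _ _ (by omega)]
    · rw [win_succ_of_gt _ _ _ hc, win_succ_of_gt _ _ _ hc, ih']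

theorem win_empty (flip : List Int) (lo : Int) (hi : Nat) (h : (hi : Int) < lo) :
    win flip lo hi = 0 := by
  induction hi with
  | zero => rfl
  | succ hi ih =>
    rw [win_succ_of_gt _ _ _ (by omega)]
    exact ih (by omega)

theorem win_congr_lo (flip : List Int) (lo lo' : Int) (hi : Nat)
    (h : lo ≤ 1) (h' : lo' ≤ 1) : win flip lo hi = win flip lo' hi := by
  induction hi with
  | zero => rfl
  | succ hi ih =>
    rw [win_succ_of_le _ _ _ (by omega), win_succ_of_le _ _ _ (by omega), ih]

theorem win_succ_of_zero (flip : List Int) (lo : Int) (hi : Nat)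
    (h : flip.getD (hi + 1) 0 = 0) : win flip lo (hi + 1) = win flip lo hi := by
  by_cases hc : lo ≤ (hi + 1 : Int)
  · rw [win_succ_of_le _ _ _ hc, h, PySem.Int.bxor_zero]
  · rw [win_succ_of_gt _ _ _ hc]

theorem bxor_bits_assoc (a b c : Int) (ha : Bit a) (hb : Bit b) (hc : Bit c) :
    PySem.Int.bxor (PySem.Int.bxor a b) c = PySem.Int.bxor a (PySem.Int.bxor b c) := by
  rcases ha with h | h <;> subst h <;> rcases hb with h | h <;> subst h <;>
    rcases hc with h | h <;> subst h <;> decide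

theorem bit_cancel (a b : Int) (ha : Bit a) (hb : Bit b) :
    PySem.Int.bxor (PySem.Int.bxor a b) a = b := by
  rcases ha with h | h <;> subst h <;> rcases hb with h | h <;> subst h <;> decide

-- pop the bottom index out of a window of 0/1 markers
theorem win_pop_bottom (flip : List Int) (lo : Int) (hi : Nat)
    (hbit : ∀ s : Nat, Bit (flip.getD s 0)) (h1 : 1 ≤ lo) (h2 : lo ≤ (hi : Int)) :
    win flip lo hi = PySem.Int.bxor (flip.getD lo.toNat 0) (win flip (lo + 1) hi) := by
  induction hi with
  | zero => omega
  | succ hi ih =>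
    by_cases hlt : lo ≤ (hi : Int)
    · rw [win_succ_of_le _ _ _ (by omega), win_succ_of_le _ _ _ (by omega),
        ih hlt, bxor_bits_assoc _ _ _ (hbit _) (win_bit _ _ _ hbit) (hbit _)]
    · have hN : lo.toNat = hi + 1 := by omega
      rw [win_succ_of_le _ _ _ (by omega), win_empty flip lo hi (by omega),
        win_empty flip (lo + 1) (hi + 1) (by omega), hN]
      rcases hbit (hi + 1) with h | h <;> rw [h] <;> decide

theorem bxor_nat_one (m : Nat) : PySem.Int.bxor (m : Int) 1 = ((m ^^^ 1 : Nat) : Int) := by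
  simp [PySem.Int.bxor]

theorem bxor_negSucc_one (m : Nat) :
    PySem.Int.bxor (-(m : Int) - 1) 1 = -((m ^^^ 1 : Nat) : Int) - 1 := by
  have h : ¬ (0:Int) ≤ -(m : Int) - 1 := by omega
  simp [PySem.Int.bxor, h]
  omega

-- XOR with 1 twice is the identity (general Int, Python-exact)
theorem bxor_one_one (a : Int) : PySem.Int.bxor (PySem.Int.bxor a 1) 1 = a := by
  by_cases h : 0 ≤ a
  · obtain ⟨m, rfl⟩ : ∃ m : Nat, a = (m : Int) := ⟨a.toNat, (Int.toNat_of_nonneg h).symm⟩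
    rw [bxor_nat_one, bxor_nat_one, Nat.xor_assoc, Nat.xor_self, Nat.xor_zero]
  · obtain ⟨m, rfl⟩ : ∃ m : Nat, a = -(m : Int) - 1 := ⟨(-a - 1).toNat, by omega⟩
    rw [bxor_negSucc_one, bxor_negSucc_one, Nat.xor_assoc, Nat.xor_self, Nat.xor_zero]

theorem bxor_bit_right_assoc (a w : Int) (hw : Bit w) :
    PySem.Int.bxor (PySem.Int.bxor a w) 1 = PySem.Int.bxor a (PySem.Int.bxor w 1) := by
  rcases hw with h | h <;> subst h
  · rw [PySem.Int.bxor_zero]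
    have h01 : PySem.Int.bxor (0:Int) 1 = 1 := by decide
    rw [h01]
  · rw [bxor_one_one]
    have h11 : PySem.Int.bxor (1:Int) 1 = 0 := by decide
    rw [h11, PySem.Int.bxor_zero]

-- indexing into `map f (take k1 rest) ++ drop k1 rest`
theorem flipwin_getD (rest : List Int) (k1 d : Nat) (f : Int → Int) :
    ((rest.take k1).map f ++ rest.drop k1).getD d 0
      = if d < k1 ∧ d < rest.length then f (rest.getD d 0) else rest.getD d 0 := by
  induction rest generalizing k1 d with
  | nil => cases k1 <;> cases d <;> simp
  | cons a l ih =>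
    cases k1 with
    | zero => simp
    | succ k1 =>
      cases d with
      | zero => simp
      | succ d => simpa [Nat.succ_lt_succ_iff] using ih k1 d

-- the simulation relation between A's inner-loop result and B's
def SimRel (r : Bool × Int × List String) (o : Option (List String)) : Prop :=
  match o with
  | none => r.1 = false
  | some plan => r = (true, (plan.length : Int), plan)

-- MAIN SIMULATION: A's parity/marker loop and B's physical-flip loop move in lockstep
theorem sim_main (A0 : List Int) (K : Int) (hK : 1 ≤ K) :
    ∀ (n : Nat) (suffix : List Int) (t : Nat) (flip : List Int) (curr : Int) (ops : List String),
      suffix.length = n →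
      suffix.length + t = A0.length →
      flip.length = A0.length + 1 →
      (∀ s : Nat, Bit (flip.getD s 0)) →
      (∀ s : Nat, (s = 0 ∨ t < s) → flip.getD s 0 = 0) →
      curr = win flip ((t : Int) + 1 - K) t →
      (∀ d : Nat, d < suffix.length →
        suffix.getD d 0 = PySem.Int.bxor (A0.getD (t + d) 0)
          (win flip ((t : Int) + (d : Int) + 2 - K) t)) →
      SimRel (aLoop (0 :: A0) (A0.length : Int) K ((t : Int) + 1) flip curr ((ops.length : Int))
               ops suffix.length)
        (bSim K (A0.length : Int) ((t : Int)) suffix ops) := by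
  intro n
  induction n with
  | zero =>
    intro suffix t flip curr ops hn _ _ _ _ _ _
    cases suffix with
    | cons a l => simp at hn
    | nil =>
      simp only [List.length_nil]
      rw [bSim]
      simp only [aLoop, SimRel]
  | succ n ih =>
    intro suffix t flip curr ops hn hlen hflen hbit hzero hcurr hsuf
    obtain ⟨x, rest, rfl⟩ : ∃ x rest, suffix = x :: rest := by
      cases suffix with
      | nil => simp at hn
      | cons a l => exact ⟨a, l, rfl⟩
    simp only [List.length_cons] at hn hlen ⊢
    have htN : t < A0.length := by omega
    -- head cell of B's working suffix
    have hx : x = PySem.Int.bxor (A0.getD t 0) (win flip ((t : Int) + 2 - K) t) := by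
      have h0 := hsuf 0 (by simp)
      simpa using h0
    -- A reads A[i] = A0[t]
    have hA : PySem.List.pyGetD (0 :: A0) ((t : Int) + 1) 0 = A0.getD t 0 := by
      have hc : ((t : Int) + 1) = ((t + 1 : Nat) : Int) := by push_cast; ring
      rw [hc, PySem.List.pyGetD_natCast]
      simp
    -- the updated parity is the parity of flips covering position t+1
    have hcurr1 : (if 1 ≤ (t : Int) + 1 - K then
          PySem.Int.bxor curr (PySem.List.pyGetD flip ((t : Int) + 1 - K) 0) else curr)
        = win flip ((t : Int) + 2 - K) t := by
      by_cases hge : 1 ≤ (t : Int) + 1 - K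
      · rw [if_pos hge, pyGetD_toNat _ _ _ (by omega), hcurr,
          win_pop_bottom flip ((t : Int) + 1 - K) t hbit hge (by omega),
          bit_cancel _ _ (hbit _) (win_bit _ _ _ hbit)]
        have : ((t : Int) + 1 - K + 1) = (t : Int) + 2 - K := by ring
        rw [this]
      · rw [if_neg hge, hcurr, win_congr_lo flip ((t : Int) + 1 - K) ((t : Int) + 2 - K) t (by omega) (by omega)]
    -- the 0/1 parity collapses the `== 1` test
    have hite : (if win flip ((t : Int) + 2 - K) t = 1 then (1:Int) else 0)
        = win flip ((t : Int) + 2 - K) t := by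
      rcases win_bit flip ((t : Int) + 2 - K) t hbit with h | h <;> simp [h]
    -- A's need_flip is exactly B's current head cell
    have hneed : PySem.Int.bxor (PySem.List.pyGetD (0 :: A0) ((t : Int) + 1) 0)
        (if win flip ((t : Int) + 2 - K) t = 1 then (1:Int) else 0) = x := by
      rw [hA, hite, ← hx]
    -- unfold one step of both loops
    rw [bSim]
    simp only [aLoop]
    rw [hcurr1, hneed]
    have hbd : ((t : Int) + 1 + K - 1) = (t : Int) + K := by ring
    rw [hbd]
    by_cases hx0 : x = 0
    · -- no flip needed: both loops just advance
      have hx0' : ¬ x ≠ 0 := not_not_intro hx0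
      rw [if_neg hx0', if_neg hx0']
      have hz1 : flip.getD (t + 1) 0 = 0 := hzero (t + 1) (Or.inr (by omega))
      have H := ih rest (t + 1) flip (win flip ((t : Int) + 2 - K) t) ops
        (by omega) (by omega) hflen hbit
        (fun s hs => hzero s (by omega))
        (by
          rw [show (((t + 1 : Nat) : Int) + 1 - K) = ((t : Int) + 2 - K) from by push_cast; ring]
          rw [win_succ_of_zero flip _ t hz1])
        (fun d hd => by
          have h1 := hsuf (d + 1) (by simpa using Nat.succ_lt_succ hd)
          have he : ((t + 1 : Nat) + d) = (t + (d + 1)) := by omega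
          have he2 : (((t + 1 : Nat) : Int) + (d : Int) + 2 - K) = ((t : Int) + ((d : Int) + 1) + 2 - K) := by
            push_cast; ring
          rw [he, he2]
          rw [win_succ_of_zero flip _ t hz1]
          simpa using h1)
      push_cast at H
      exact H
    · have hx0' : x ≠ 0 := hx0
      rw [if_pos hx0', if_pos hx0']
      by_cases hb : (t : Int) + K > (A0.length : Int)
      · rw [if_pos hb, if_pos hb]
        rfl
      · rw [if_neg hb, if_neg hb]
        -- a flip starts at position t+1: A marks flip[t+1], B physically flips K cells
        have hKN : ((t : Int) + K) ≤ (A0.length : Int) := by omega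
        have hiN : ((t : Int) + 1).toNat = t + 1 := by omega
        rw [hiN]
        have ht1len : t + 1 < flip.length := by omega
        set k1 : Nat := (K - 1).toNat with hk1
        have hsl1 : PySem.List.slice rest none (some (K - 1)) = rest.take k1 :=
          PySem.List.slice_to rest (show (0:Int) ≤ K - 1 by omega)
        have hsl2 : PySem.List.slice rest (some (K - 1)) none = rest.drop k1 :=
          PySem.List.slice_from rest (show (0:Int) ≤ K - 1 by omega)
        rw [hsl1, hsl2]
        set flip' : List Int := flip.set (t + 1) 1 with hflip'
        set s' : List Int := (rest.take k1).map (fun v => PySem.Int.bxor v 1) ++ rest.drop k1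
          with hs'
        have hs'len : s'.length = rest.length := by
          rw [hs']
          simp only [List.length_append, List.length_map, List.length_take, List.length_drop]
          omega
        have hbit' : ∀ s : Nat, Bit (flip'.getD s 0) := by
          intro s
          by_cases hst : s = t + 1
          · subst hst
            rw [hflip', getD_set_self _ _ _ _ ht1len]
            exact Or.inr rfl
          · rw [hflip', getD_set_ne _ _ _ _ _ (fun he => hst he.symm)]
            exact hbit s
        have hget1 : flip'.getD (t + 1) 0 = 1 := by
          rw [hflip', getD_set_self _ _ _ _ ht1len]
        have H := ih s' (t + 1) flip' (PySem.Int.bxor (win flip ((t : Int) + 2 - K) t) 1)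
          (ops ++ [pvLine ((t : Int) + 1) ((t : Int) + K)])
          (by omega) (by omega) (by rw [hflip']; simpa using hflen) hbit'
          (fun s hs => by
            have hst : s ≠ t + 1 := by omega
            rw [hflip', getD_set_ne _ _ _ _ _ (fun he => hst he.symm)]
            exact hzero s (by omega))
          (by
            rw [show (((t + 1 : Nat) : Int) + 1 - K) = ((t : Int) + 2 - K) from by push_cast; ring]
            rw [win_succ_of_le flip' ((t : Int) + 2 - K) t (by omega), hget1,
              win_set_of_gt flip ((t : Int) + 2 - K) t (t + 1) 1 (by omega)])
          (fun d hd => by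
            rw [hs'len] at hd
            have hrest := hsuf (d + 1) (by simpa using Nat.succ_lt_succ hd)
            have hrest' : rest.getD d 0 = PySem.Int.bxor (A0.getD (t + (d + 1)) 0)
                (win flip ((t : Int) + ((d : Int) + 1) + 2 - K) t) := by simpa using hrest
            have he : ((t + 1 : Nat) + d) = (t + (d + 1)) := by omega
            have he2 : (((t + 1 : Nat) : Int) + (d : Int) + 2 - K)
                = ((t : Int) + ((d : Int) + 1) + 2 - K) := by push_cast; ring
            rw [he, he2]
            by_cases hdk : d < k1
            · -- inside the flipped window
              have hgd : s'.getD d 0 = PySem.Int.bxor (rest.getD d 0) 1 := by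
                rw [hs', flipwin_getD, if_pos ⟨hdk, hd⟩]
              rw [hgd, hrest']
              rw [win_succ_of_le flip' ((t : Int) + ((d : Int) + 1) + 2 - K) t (by omega), hget1,
                win_set_of_gt flip ((t : Int) + ((d : Int) + 1) + 2 - K) t (t + 1) 1 (by omega)]
              exact bxor_bit_right_assoc _ _ (win_bit _ _ _ hbit)
            · -- beyond the flipped window
              have hgd : s'.getD d 0 = rest.getD d 0 := by
                rw [hs', flipwin_getD, if_neg (fun hcon => hdk hcon.1)]
              rw [hgd, hrest']
              rw [win_succ_of_gt flip' ((t : Int) + ((d : Int) + 1) + 2 - K) t (by omega),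
                win_set_of_gt flip ((t : Int) + ((d : Int) + 1) + 2 - K) t (t + 1) 1 (by omega)])
        simp only [List.length_append, List.length_singleton, hs'len] at H
        push_cast at H
        exact H

-- ===== VERDICT (by name: the statement is the Claim_ definition above) =====
theorem compute_optimal_plan_py_spec : Claim_equal_compute_optimal_plan_py := by
  intro A0 _
  unfold Spec_compute_optimal_plan_py
  simp only [compute_optimal_plan_py, compute_optimal_plan_py_alt]
  apply PySem.List.foldl_congr_mem
  intro st Kv hKmem
  have hK : 1 ≤ Kv := (PySem.List.mem_pyRange_one.mp hKmem).1
  have H := sim_main A0 Kv hK A0.length A0 0 (List.replicate (A0.length + 1) 0) 0 [] rfl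
      (by omega) (by simp) (fun s => by rw [replicate_getD]; exact Or.inl rfl)
      (fun s _ => replicate_getD _ _) (win_zero _ _).symm
      (fun d hd => by rw [win_zero, PySem.Int.bxor_zero]; simp)
  norm_num at H
  rw [show ((A0.length : Int)).toNat = A0.length from by omega]
  cases hb : bSim Kv (A0.length : Int) 0 A0 [] with
  | none =>
    rw [hb] at H
    simp only [SimRel] at H
    simp [H]
  | some plan =>
    rw [hb] at H
    simp only [SimRel] at H
    rw [H]
    by_cases hlt : (plan.length : Int) < st.2.1
    · simp [hlt]
    · simp [hlt]
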